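-- pv_equiv track=rewrite | github.com/Jaceyli/COMP9021-17S2 | Assignment/Assignment_1/pivoting_die.py | turn_up
-- ===== SOURCE A (Python) =====
-- L = [6, 5, 4, 3, 2, 1]
--
-- def turn_up(top, front, right, n):
--     n %= 4
--     if n == 0:
--         return top, front, right
--     elif n == 1:
--         return front, L[top - 1], right
--     else:
--         return turn_up(front, L[top - 1], right, n - 1)
-- ===== SOURCE B (Python) =====
-- L = [6, 5, 4, 3, 2, 1]
--
-- def turn_up(top, front, right, n):
--     n %= 4
--     if n == 0:
--         return top, front, right
--     if n == 1:
--         return front, L[top - 1], right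
--     if n == 2:
--         return L[top - 1], L[front - 1], right
--     return L[front - 1], L[L[top - 1] - 1], right
-- ===== Notes on version B (the rewrite author's own statement) =====
-- stated objective: simpler
-- what changed: Replaces A's step-by-step recursion with a direct four-case table over n % 4, reading each final face straight from L instead of iterating the quarter-turn map.
-- outside the precondition, e.g. on turn_up(7, 2, 3, 1): A raises IndexError, B raises IndexError
import Mathlib
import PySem

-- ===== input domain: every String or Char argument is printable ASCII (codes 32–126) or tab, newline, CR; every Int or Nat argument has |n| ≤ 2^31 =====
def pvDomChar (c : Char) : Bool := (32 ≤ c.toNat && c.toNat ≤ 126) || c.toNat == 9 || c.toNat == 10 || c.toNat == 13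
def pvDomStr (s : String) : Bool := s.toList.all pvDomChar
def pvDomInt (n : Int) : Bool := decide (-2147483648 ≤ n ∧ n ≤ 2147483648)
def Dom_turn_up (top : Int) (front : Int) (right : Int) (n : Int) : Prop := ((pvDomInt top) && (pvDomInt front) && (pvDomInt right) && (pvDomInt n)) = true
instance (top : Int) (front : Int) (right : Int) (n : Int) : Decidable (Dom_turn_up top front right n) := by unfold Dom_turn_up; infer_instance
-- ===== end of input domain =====

-- B replaces A's step-by-step recursion with a direct four-case table over n % 4 (objective: simpler).

-- ===== PORT A =====
-- module-level constant L = [6, 5, 4, 3, 2, 1]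
def dieL : List Int := [6, 5, 4, 3, 2, 1]

-- L[x - 1] (Python indexing, negative wraparound; none = IndexError, excluded by Pre_)
def dieLook (x : Int) : Int := (PySem.List.pyGet? dieL (x - 1)).getD 0

-- A's recursion: after 'n %= 4' the reduced count is in [0,4); the recursive call's own
-- 'n %= 4' is the identity there, so the recursion is on the reduced count directly.
def turn_up_aux : Nat → Int → Int → Int → Int × Int × Int
  | 0, top, front, right => (top, front, right)
  | 1, top, front, right => (front, dieLook top, right)
  | (k + 2), top, front, right => turn_up_aux (k + 1) front (dieLook top) right

def turn_up (top : Int) (front : Int) (right : Int) (n : Int) : Int × Int × Int :=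
  turn_up_aux (PySem.Int.mod n 4).toNat top front right

-- ===== PORT B =====
def turn_up_alt (top : Int) (front : Int) (right : Int) (n : Int) : Int × Int × Int :=
  let m := PySem.Int.mod n 4
  if m = 0 then (top, front, right)
  else if m = 1 then (front, dieLook top, right)
  else if m = 2 then (dieLook top, dieLook front, right)
  else (dieLook front, dieLook (dieLook top - 1 + 1), right)

-- ===== PRECONDITION & SPEC =====
-- Pre_ excludes exactly the inputs on which Python A raises IndexError (L[top-1] or a
-- subsequent lookup out of range); B raises there too.
def Pre_turn_up (top : Int) (front : Int) (right : Int) (n : Int) : Prop :=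
  PySem.Int.mod n 4 = 0 ∨
  (PySem.Int.mod n 4 = 1 ∧ -5 ≤ top ∧ top ≤ 6) ∨
  (2 ≤ PySem.Int.mod n 4 ∧ -5 ≤ top ∧ top ≤ 6 ∧ -5 ≤ front ∧ front ≤ 6)

instance (top : Int) (front : Int) (right : Int) (n : Int) : Decidable (Pre_turn_up top front right n) := by unfold Pre_turn_up; infer_instance

def pvWitness_turn_up : Int × Int × Int × Int := (1, 2, 3, 7)

def Spec_turn_up (top : Int) (front : Int) (right : Int) (n : Int) (out : Int × Int × Int) : Prop := out = turn_up_alt top front right n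
instance (top : Int) (front : Int) (right : Int) (n : Int) (out : Int × Int × Int) : Decidable (Spec_turn_up top front right n out) := by unfold Spec_turn_up; infer_instance

-- ===== CLAIM (what is proved, stated in full; the proofs are below) =====
def Claim_equal_turn_up : Prop := ∀ (top : Int) (front : Int) (right : Int) (n : Int), Dom_turn_up top front right n → Pre_turn_up top front right n → Spec_turn_up top front right n (turn_up top front right n)

-- ===== LEMMAS AND PROOFS =====

theorem mod4_cases (n : Int) :
    PySem.Int.mod n 4 = 0 ∨ PySem.Int.mod n 4 = 1 ∨ PySem.Int.mod n 4 = 2 ∨ PySem.Int.mod n 4 = 3 := by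
  rw [PySem.Int.mod_eq_emod_of_pos (by norm_num : (0:Int) < 4)]
  have h1 := Int.emod_nonneg n (by norm_num : (4:Int) ≠ 0)
  have h2 := Int.emod_lt_of_pos n (by norm_num : (0:Int) < 4)
  omega

-- ===== VERDICT (by name: the statement is the Claim_ definition above) =====
theorem turn_up_spec : Claim_equal_turn_up := by
  intro top front right n _ _
  unfold Spec_turn_up turn_up turn_up_alt
  rcases mod4_cases n with h | h | h | h <;>
    rw [PySem.Int.mod_eq_emod_of_pos (by norm_num : (0:Int) < 4)] at h <;>
    simp [h, turn_up_aux, dieLook, PySem.List.pyGet?]
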